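-- pv_equiv track=rewrite | github.com/FredericHorn/masterarbeit-code | hypothesentest.py | generiere_all_nicht_ct
-- ===== SOURCE A (Python) =====
-- ordnung = 5
--
-- def generiere_all_nicht_ct(n, aktuelles_array=[]):
--     if len(aktuelles_array) == n:
--         if sum(aktuelles_array) % ordnung != 0:
--             return [aktuelles_array]
--         else:
--             return []
--
--     arrays = []
--     for i in range(ordnung):
--         neues_array = aktuelles_array + [i]
--         arrays.extend(generiere_all_nicht_ct(n, neues_array))
--
--     return arrays
-- ===== SOURCE B (Python) =====
-- import itertools
--
-- def generiere_all_nicht_ct(n, aktuelles_array=[]):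
--     m = n - len(aktuelles_array)
--     s = sum(aktuelles_array)
--     return [list(aktuelles_array) + list(t)
--             for t in itertools.product(range(5), repeat=m)
--             if (s + sum(t)) % 5 != 0]
-- ===== Notes on version B (the rewrite author's own statement) =====
-- stated objective: idiomatic
-- what changed: Replaces the 5-way recursive tree build with a single itertools.product enumeration of the suffixes, filtered by a precomputed prefix sum in one list comprehension.
import Mathlib
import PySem

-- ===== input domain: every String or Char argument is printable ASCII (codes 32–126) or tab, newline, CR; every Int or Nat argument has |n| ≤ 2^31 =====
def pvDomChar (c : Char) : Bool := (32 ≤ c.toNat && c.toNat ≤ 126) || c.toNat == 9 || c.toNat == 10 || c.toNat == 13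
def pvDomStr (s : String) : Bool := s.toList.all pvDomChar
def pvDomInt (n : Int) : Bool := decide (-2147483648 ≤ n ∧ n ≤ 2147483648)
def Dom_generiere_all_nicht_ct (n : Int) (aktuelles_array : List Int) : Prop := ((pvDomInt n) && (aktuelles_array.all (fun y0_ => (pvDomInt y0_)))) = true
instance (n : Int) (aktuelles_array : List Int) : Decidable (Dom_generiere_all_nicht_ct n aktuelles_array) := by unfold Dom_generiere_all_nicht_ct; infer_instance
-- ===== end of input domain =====

-- B replaces A's 5-way recursion by an itertools.product enumeration of the suffixes
-- filtered against a precomputed prefix sum (idiomatic; same asymptotic cost).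


-- ===== PORT A =====
-- A recurses, extending the array by one of 0..4 until its length reaches n; the
-- recursion only terminates when length ≤ n, so we drive it with fuel = (n - len).toNat,
-- which is exactly the recursion depth on every input A returns on (inside Pre_).
def genA_fuel (n : Int) (arr : List Int) (fuel : Nat) : List (List Int) :=
  if (arr.length : Int) = n then
    if PySem.Int.mod arr.sum 5 ≠ 0 then [arr] else []
  else
    match fuel with
    | 0 => []  -- unreachable inside Pre_; A does not return here
    | f + 1 =>
      (PySem.List.pyRange 0 5 1).foldl
        (fun acc i => acc ++ genA_fuel n (arr ++ [i]) f) []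
termination_by fuel

def generiere_all_nicht_ct (n : Int) (aktuelles_array : List Int) : List (List Int) :=
  genA_fuel n aktuelles_array ((n - aktuelles_array.length).toNat)

-- ===== PORT B =====
-- itertools.product(range(5), repeat=m) in lexicographic order
def prodTuples : Nat → List (List Int)
  | 0 => [[]]
  | m + 1 => ((List.range 5).map (Int.ofNat)).flatMap
      (fun i => (prodTuples m).map (fun t => i :: t))

def generiere_all_nicht_ct_alt (n : Int) (aktuelles_array : List Int) : List (List Int) :=
  let m := (n - aktuelles_array.length).toNat
  let s := aktuelles_array.sum
  (prodTuples m).filterMap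
    (fun t => if PySem.Int.mod (s + t.sum) 5 ≠ 0 then some (aktuelles_array ++ t) else none)

-- ===== PRECONDITION & SPEC =====
-- Pre_ excludes len(aktuelles_array) > n, where A never returns (its recursion only
-- grows the array and raises RecursionError); B raises ValueError there too.
def Pre_generiere_all_nicht_ct (n : Int) (aktuelles_array : List Int) : Prop :=
  (aktuelles_array.length : Int) ≤ n

instance (n : Int) (aktuelles_array : List Int) : Decidable (Pre_generiere_all_nicht_ct n aktuelles_array) := by unfold Pre_generiere_all_nicht_ct; infer_instance

def pvWitness_generiere_all_nicht_ct : Int × List Int := (3, [2])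

def Spec_generiere_all_nicht_ct (n : Int) (aktuelles_array : List Int) (out : List (List Int)) : Prop := out = generiere_all_nicht_ct_alt n aktuelles_array
instance (n : Int) (aktuelles_array : List Int) (out : List (List Int)) : Decidable (Spec_generiere_all_nicht_ct n aktuelles_array out) := by unfold Spec_generiere_all_nicht_ct; infer_instance

-- ===== CLAIM (what is proved, stated in full; the proofs are below) =====
def Claim_equal_generiere_all_nicht_ct : Prop := ∀ (n : Int) (aktuelles_array : List Int), Dom_generiere_all_nicht_ct n aktuelles_array → Pre_generiere_all_nicht_ct n aktuelles_array → Spec_generiere_all_nicht_ct n aktuelles_array (generiere_all_nicht_ct n aktuelles_array)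

-- ===== LEMMAS AND PROOFS =====

-- With fuel exactly the remaining length, A's recursion equals B's product-filter form.
lemma genA_fuel_eq (fuel : Nat) : ∀ (n : Int) (arr : List Int),
    (arr.length : Int) + fuel = n →
    genA_fuel n arr fuel =
      (prodTuples fuel).filterMap
        (fun t => if PySem.Int.mod (arr.sum + t.sum) 5 ≠ 0 then some (arr ++ t) else none) := by
  induction fuel with
  | zero =>
    intro n arr h
    simp only [Nat.cast_zero, add_zero] at h
    rw [genA_fuel]
    simp only [h, if_true, prodTuples, List.filterMap, List.sum_nil, add_zero, List.append_nil]
    split_ifs <;> rfl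
  | succ f ih =>
    intro n arr h
    have hne : (arr.length : Int) ≠ n := by omega
    rw [genA_fuel]
    simp only [hne, if_false]
    rw [PySem.List.foldl_append_eq_flatMap]
    simp only [prodTuples, List.filterMap_flatMap]
    have hr : PySem.List.pyRange 0 5 1 = (List.range 5).map (Int.ofNat) := by decide
    rw [hr]
    simp only [List.nil_append]
    congr 1
    funext i
    rw [ih n (arr ++ [i]) (by simp; push_cast at h ⊢; omega)]
    rw [List.filterMap_map]
    apply List.filterMap_congr
    intro t _
    simp only [Function.comp, List.sum_cons, List.sum_append, List.sum_cons, List.sum_nil,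
      add_zero, List.append_assoc, List.cons_append, List.nil_append]
    ring_nf

-- ===== VERDICT (by name: the statement is the Claim_ definition above) =====
theorem generiere_all_nicht_ct_spec : Claim_equal_generiere_all_nicht_ct := by
  intro n arr _ hpre
  unfold Spec_generiere_all_nicht_ct generiere_all_nicht_ct generiere_all_nicht_ct_alt
  exact genA_fuel_eq _ n arr (by unfold Pre_generiere_all_nicht_ct at hpre; omega)
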